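-- pv_equiv track=rewrite | github.com/canadianbees/bass_autocharter | src/postprocess.py | _fix_octave_errors
-- ===== SOURCE A (Python) =====
-- BASS_MIDI_MIN = 28    # E1  — lowest note on standard 4-string bass
--
-- BASS_MIDI_MAX = 55    # G3  — cap lower than before to kill octave errors
--
-- def _fix_octave_errors(notes: list[tuple]) -> list[tuple]:
--     """
--     Shift notes outside the bass range up or down by octaves until in range.
--     BASS_MIDI_MAX is set conservatively (G3) to catch the common case where
--     the detector picks up an overtone an octave above the real note.
--     """
--     fixed = []
--     for start, end, pitch in notes:
--         while pitch > BASS_MIDI_MAX: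
--             pitch -= 12
--         while pitch < BASS_MIDI_MIN:
--             pitch += 12
--         fixed.append((start, end, pitch))
--     return fixed
-- ===== SOURCE B (Python) =====
-- BASS_MIDI_MIN = 28
-- BASS_MIDI_MAX = 55
--
-- def _clamp(p):
--     if p > BASS_MIDI_MAX:
--         return p - 12 * ((p - BASS_MIDI_MAX + 11) // 12)
--     if p < BASS_MIDI_MIN:
--         return p + 12 * ((BASS_MIDI_MIN - p + 11) // 12)
--     return p
--
-- def _fix_octave_errors(notes: list[tuple]) -> list[tuple]:
--     return [(start, end, _clamp(pitch)) for start, end, pitch in notes]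
-- ===== Notes on version B (the rewrite author's own statement) =====
-- stated objective: simpler
-- what changed: Replaced the per-note while loops (one octave per iteration) with a single closed-form octave shift via ceiling division, and built the result by a comprehension instead of append-accumulation.
import Mathlib
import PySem

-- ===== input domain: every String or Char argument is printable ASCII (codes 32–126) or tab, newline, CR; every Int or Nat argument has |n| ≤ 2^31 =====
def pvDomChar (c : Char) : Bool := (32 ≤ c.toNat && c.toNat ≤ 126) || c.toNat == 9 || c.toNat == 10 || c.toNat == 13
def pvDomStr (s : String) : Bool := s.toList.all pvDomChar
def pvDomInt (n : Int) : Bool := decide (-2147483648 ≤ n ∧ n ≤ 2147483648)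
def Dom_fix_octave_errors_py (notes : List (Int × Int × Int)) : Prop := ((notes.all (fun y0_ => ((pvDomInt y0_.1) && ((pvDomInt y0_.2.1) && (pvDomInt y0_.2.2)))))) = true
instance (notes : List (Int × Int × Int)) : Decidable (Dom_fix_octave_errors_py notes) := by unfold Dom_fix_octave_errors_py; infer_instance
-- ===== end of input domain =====

-- B replaces A's one-octave-at-a-time while loops by a closed-form ceiling-division octave shift (simpler; no loop per note).

-- ===== PORT A =====
-- `while pitch > BASS_MIDI_MAX: pitch -= 12`
def pvDownA (p : Int) : Int :=
  if _h : p > 55 then pvDownA (p - 12) else p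
termination_by (p - 55).toNat
decreasing_by omega

-- `while pitch < BASS_MIDI_MIN: pitch += 12`
def pvUpA (p : Int) : Int :=
  if _h : p < 28 then pvUpA (p + 12) else p
termination_by (28 - p).toNat
decreasing_by omega

def fix_octave_errors_py (notes : List (Int × Int × Int)) : List (Int × Int × Int) :=
  notes.foldl (fun fixed n =>
    let start := n.1; let end_ := n.2.1; let pitch := n.2.2
    fixed ++ [(start, end_, pvUpA (pvDownA pitch))]) []

-- ===== PORT B =====
def pvClampB (p : Int) : Int :=
  if p > 55 then p - 12 * (PySem.Int.floordiv (p - 55 + 11) 12)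
  else if p < 28 then p + 12 * (PySem.Int.floordiv (28 - p + 11) 12)
  else p

def fix_octave_errors_py_alt (notes : List (Int × Int × Int)) : List (Int × Int × Int) :=
  notes.map (fun n => (n.1, n.2.1, pvClampB n.2.2))

-- ===== PRECONDITION & SPEC =====
def Spec_fix_octave_errors_py (notes : List (Int × Int × Int)) (out : List (Int × Int × Int)) : Prop := out = fix_octave_errors_py_alt notes
instance (notes : List (Int × Int × Int)) (out : List (Int × Int × Int)) : Decidable (Spec_fix_octave_errors_py notes out) := by unfold Spec_fix_octave_errors_py; infer_instance

-- ===== CLAIM (what is proved, stated in full; the proofs are below) =====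
def Claim_equal_fix_octave_errors_py : Prop := ∀ (notes : List (Int × Int × Int)), Dom_fix_octave_errors_py notes → Spec_fix_octave_errors_py notes (fix_octave_errors_py notes)

-- ===== LEMMAS AND PROOFS =====
theorem pvDownA_eq (p : Int) : pvDownA p = if p > 55 then p - 12 * ((p - 55 + 11) / 12) else p := by
  induction p using pvDownA.induct with
  | case1 p h ih =>
    rw [pvDownA]; simp only [dif_pos h]; rw [ih]
    split_ifs <;> omega
  | case2 p h =>
    rw [pvDownA]; simp only [dif_neg h]; rw [if_neg h]

theorem pvUpA_eq (p : Int) : pvUpA p = if p < 28 then p + 12 * ((28 - p + 11) / 12) else p := by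
  induction p using pvUpA.induct with
  | case1 p h ih =>
    rw [pvUpA]; simp only [dif_pos h]; rw [ih]
    split_ifs <;> omega
  | case2 p h =>
    rw [pvUpA]; simp only [dif_neg h]; rw [if_neg h]

theorem clamp_eq (p : Int) : pvUpA (pvDownA p) = pvClampB p := by
  unfold pvClampB
  rw [pvDownA_eq,
      PySem.Int.floordiv_eq_ediv_of_pos (a := p - 55 + 11) (by norm_num),
      PySem.Int.floordiv_eq_ediv_of_pos (a := 28 - p + 11) (by norm_num)]
  split_ifs with h1 h2 <;> rw [pvUpA_eq] <;> split_ifs <;> omega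

theorem fix_octave_errors_py_spec : Claim_equal_fix_octave_errors_py := by
  intro notes _
  unfold Spec_fix_octave_errors_py fix_octave_errors_py fix_octave_errors_py_alt
  rw [PySem.List.foldl_append_singleton_eq_map]
  exact List.map_congr_left (fun n _ => by simp [clamp_eq])
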